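-- pv_equiv track=rewrite | github.com/eliottcassidy2000/math | 04-computation/overlap_cross_length.py | overlap_weight_matrix_analysis
-- ===== SOURCE A (Python) =====
-- from collections import defaultdict
--
-- def overlap_weight_matrix_analysis(by_k, p):
--     """Analyze the full overlap weight matrix restricted to 3-cycles.
--
--     For each pair of 3-cycles, compute:
--     - overlap = |V(C1) ∩ V(C2)|
--     - gap structure: the gaps between the cycles on Z_p
--     """
--     c3 = by_k.get(3, [])
--     n3 = len(c3)
--
--     # Compute the overlap histogram by gap
--     # For two 3-cycles {0,a,b} and {0,c,d}, the overlap depends on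
--     # whether {a,b} ∩ {c,d} is nonempty
--     # But for general cycles, we need to check all rotations
--
--     # Key idea: for circulant tournament, the overlap between C_i and C_j
--     # depends on the "relative position" of their vertex sets on Z_p
--
--     # Let's compute: for each pair of gap-type triples, what's the
--     # expected overlap when placed randomly vs on Z_p?
--
--     # First: gap types for 3-cycles
--     # A 3-cycle uses 3 vertices spanning gaps (d1, d2, d3) with d1+d2+d3 = p
--     # For circulant, we can normalize so one vertex is 0
--
--     gap_types = defaultdict(list)
--     for idx, fs in enumerate(c3):
--         verts = sorted(fs)
--         # Translate so min vertex is 0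
--         shifted = [v - verts[0] for v in verts]
--         gaps = tuple(sorted([shifted[1], shifted[2] - shifted[1], p - shifted[2]]))
--         gap_types[gaps].append(idx)
--
--     return gap_types
-- ===== SOURCE B (Python) =====
-- from collections import defaultdict
--
--
-- def overlap_weight_matrix_analysis(by_k, p):
--     """Group 3-cycles by normalized gap-type signature.
--
--     Alternative decomposition: compute every cycle's signature once,
--     then build each group by a filter pass per distinct signature
--     (first-occurrence order), instead of accumulating a dict in one pass.
--     """
--     c3 = by_k.get(3, [])
--
--     def gap_sig(fs):
--         verts = sorted(fs)
--         shifted = [v - verts[0] for v in verts]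
--         return tuple(sorted([shifted[1], shifted[2] - shifted[1], p - shifted[2]]))
--
--     sigs = [gap_sig(fs) for fs in c3]
--     out = defaultdict(list)
--     for g in dict.fromkeys(sigs):
--         out[g] = [i for i, s in enumerate(sigs) if s == g]
--     return out
-- ===== Notes on version B (the rewrite author's own statement) =====
-- stated objective: alternative
-- what changed: A accumulates groups in one pass by appending each index into a defaultdict keyed by the gap signature; B first materializes the list of signatures, dedups it in first-occurrence order, and builds each group by a filter pass over the enumerated signature list.
import Mathlib
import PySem

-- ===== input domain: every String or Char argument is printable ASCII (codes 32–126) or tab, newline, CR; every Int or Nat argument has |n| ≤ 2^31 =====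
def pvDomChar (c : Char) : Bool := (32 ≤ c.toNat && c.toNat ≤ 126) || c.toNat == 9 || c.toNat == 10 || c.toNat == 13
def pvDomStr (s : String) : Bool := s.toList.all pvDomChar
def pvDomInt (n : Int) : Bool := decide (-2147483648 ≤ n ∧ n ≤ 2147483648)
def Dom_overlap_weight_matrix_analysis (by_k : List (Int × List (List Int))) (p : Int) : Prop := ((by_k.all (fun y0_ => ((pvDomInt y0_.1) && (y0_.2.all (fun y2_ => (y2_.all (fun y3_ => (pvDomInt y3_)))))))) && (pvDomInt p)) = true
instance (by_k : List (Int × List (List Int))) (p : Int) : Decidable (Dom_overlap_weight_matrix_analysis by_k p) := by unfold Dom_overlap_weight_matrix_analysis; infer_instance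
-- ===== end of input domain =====

-- B replaces A's one-pass defaultdict accumulation by signature-list + ordered dedup + a filter pass
-- per distinct signature (objective: alternative decomposition, same results, not claimed faster).

-- ===== PORT A =====
def overlap_weight_matrix_analysis (by_k : List (Int × List (List Int))) (p : Int) : List (Int × Int × Int × List Int) :=
  let c3 : List (List Int) :=
    match by_k.find? (fun kv => kv.1 == 3) with
    | some kv => kv.2
    | none => []
  let gap_types : PySem.Dict (Int × Int × Int) (List Int) :=
    (PySem.List.enumerate c3).foldl (fun d x =>
      let verts := PySem.List.sorted x.2 (fun v => v) false
      let v0 := PySem.List.pyGetD verts 0 0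
      let shifted := verts.map (fun v => v - v0)
      let s1 := PySem.List.pyGetD shifted 1 0
      let s2 := PySem.List.pyGetD shifted 2 0
      let gaps := PySem.List.sorted [s1, s2 - s1, p - s2] (fun v => v) false
      let g : Int × Int × Int :=
        (PySem.List.pyGetD gaps 0 0, PySem.List.pyGetD gaps 1 0, PySem.List.pyGetD gaps 2 0)
      d.modify g [] (fun l => l ++ [x.1])) PySem.Dict.empty
  gap_types.items.map (fun kv => (kv.1.1, kv.1.2.1, kv.1.2.2, kv.2))

-- ===== PORT B =====
-- B's helper gap_sig(fs): the same shift/gap/sort signature computation, factored out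
def pvGapSig (p : Int) (fs : List Int) : Int × Int × Int :=
  let verts := PySem.List.sorted fs (fun v => v) false
  let v0 := PySem.List.pyGetD verts 0 0
  let shifted := verts.map (fun v => v - v0)
  let s1 := PySem.List.pyGetD shifted 1 0
  let s2 := PySem.List.pyGetD shifted 2 0
  let gaps := PySem.List.sorted [s1, s2 - s1, p - s2] (fun v => v) false
  (PySem.List.pyGetD gaps 0 0, PySem.List.pyGetD gaps 1 0, PySem.List.pyGetD gaps 2 0)

def overlap_weight_matrix_analysis_alt (by_k : List (Int × List (List Int))) (p : Int) : List (Int × Int × Int × List Int) :=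
  let c3 : List (List Int) :=
    match by_k.find? (fun kv => kv.1 == 3) with
    | some kv => kv.2
    | none => []
  let sigs := c3.map (pvGapSig p)
  (PySem.List.dedup sigs).map (fun g =>
    (g.1, g.2.1, g.2.2,
      ((PySem.List.enumerate sigs).filter (fun q => q.2 == g)).map (fun q => q.1)))

-- ===== PRECONDITION & SPEC =====
-- Pre_ excludes inputs where some 3-cycle entry has fewer than 3 vertices: there Python A
-- (and B alike) raises IndexError at shifted[1]/shifted[2].
def Pre_overlap_weight_matrix_analysis (by_k : List (Int × List (List Int))) (p : Int) : Prop :=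
  ∀ fs ∈ (match by_k.find? (fun kv => kv.1 == 3) with
          | some kv => kv.2
          | none => ([] : List (List Int))), 3 ≤ fs.length
instance (by_k : List (Int × List (List Int))) (p : Int) : Decidable (Pre_overlap_weight_matrix_analysis by_k p) := by unfold Pre_overlap_weight_matrix_analysis; infer_instance

def pvWitness_overlap_weight_matrix_analysis : (List (Int × List (List Int))) × Int :=
  ([(3, [[0, 1, 2], [0, 2, 4], [1, 3, 5], [2, 3, 4]])], 7)

def Spec_overlap_weight_matrix_analysis (by_k : List (Int × List (List Int))) (p : Int) (out : List (Int × Int × Int × List Int)) : Prop := out = overlap_weight_matrix_analysis_alt by_k p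
instance (by_k : List (Int × List (List Int))) (p : Int) (out : List (Int × Int × Int × List Int)) : Decidable (Spec_overlap_weight_matrix_analysis by_k p out) := by unfold Spec_overlap_weight_matrix_analysis; infer_instance

-- ===== CLAIM (what is proved, stated in full; the proofs are below) =====
def Claim_equal_overlap_weight_matrix_analysis : Prop := ∀ (by_k : List (Int × List (List Int))) (p : Int), Dom_overlap_weight_matrix_analysis by_k p → Pre_overlap_weight_matrix_analysis by_k p → Spec_overlap_weight_matrix_analysis by_k p (overlap_weight_matrix_analysis by_k p)

-- ===== LEMMAS AND PROOFS =====

-- enumerate commutes with map on the element component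
theorem pv_enumerate_map {α β : Type} (f : α → β) (xs : List α) (s : Int) :
    PySem.List.enumerate (xs.map f) s
      = (PySem.List.enumerate xs s).map (fun q => (q.1, f q.2)) := by
  induction xs generalizing s with
  | nil => simp [PySem.List.enumerate_nil]
  | cons x xs ih => simp [PySem.List.enumerate_cons, ih]

theorem pv_main (c3 : List (List Int)) (p : Int) :
    ((PySem.List.enumerate c3).foldl (fun d x =>
        d.modify (pvGapSig p x.2) [] (fun l => l ++ [x.1]))
        (PySem.Dict.empty : PySem.Dict (Int × Int × Int) (List Int))).items.map
          (fun kv => (kv.1.1, kv.1.2.1, kv.1.2.2, kv.2))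
      = (PySem.List.dedup (c3.map (pvGapSig p))).map (fun g =>
          (g.1, g.2.1, g.2.2,
            ((PySem.List.enumerate (c3.map (pvGapSig p))).filter (fun q => q.2 == g)).map
              (fun q => q.1))) := by
  set pairs := PySem.List.enumerate c3 with hpairs
  set d := pairs.foldl (fun d x =>
      d.modify (pvGapSig p x.2) [] (fun l => l ++ [x.1]))
      (PySem.Dict.empty : PySem.Dict (Int × Int × Int) (List Int)) with hd
  have hnodup : d.keys.Nodup := by
    rw [hd]
    exact PySem.Dict.nodup_keys_foldl_modify_key pairs (fun x => pvGapSig p x.2) []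
      (fun d x l => l ++ [x.1]) _ PySem.Dict.nodup_keys_empty
  have hkeys : d.keys = PySem.List.dedup (c3.map (pvGapSig p)) := by
    rw [hd, PySem.Dict.keys_foldl_modify_key]
    have hm : pairs.map (fun x => pvGapSig p x.2) = c3.map (pvGapSig p) := by
      conv_rhs => rw [← PySem.List.map_snd_enumerate c3 0]
      rw [hpairs, List.map_map]
      simp [Function.comp]
    rw [hm]
    simp [PySem.Dict.keys_empty, PySem.Set.update_nil_left, PySem.List.dedup_eq_ofList]
  have hgetD : ∀ g, d.getD g [] =
      ((PySem.List.enumerate (c3.map (pvGapSig p))).filter (fun q => q.2 == g)).map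
        (fun q => q.1) := by
    intro g
    have h1 : d = (pairs.map (fun x => (pvGapSig p x.2, x.1))).foldl
        (fun d q => d.modify q.1 [] (fun l => l ++ [q.2])) PySem.Dict.empty := by
      rw [hd, List.foldl_map]
    rw [h1, PySem.Dict.getD_foldl_modify_append, pv_enumerate_map]
    simp only [PySem.Dict.getD_empty, List.nil_append, List.filter_map, List.map_map]
    rfl
  rw [PySem.Dict.items_eq_map_keys d hnodup [], List.map_map, hkeys]
  apply List.map_congr_left
  intro g _
  simp only [Function.comp]
  rw [hgetD g]

-- ===== VERDICT (by name: the statement is the Claim_ definition above) =====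
theorem overlap_weight_matrix_analysis_spec : Claim_equal_overlap_weight_matrix_analysis := by
  intro by_k p _ _
  unfold Spec_overlap_weight_matrix_analysis
  unfold overlap_weight_matrix_analysis overlap_weight_matrix_analysis_alt
  cases h : by_k.find? (fun kv => kv.1 == 3) with
  | none => simpa [h] using pv_main [] p
  | some kv => simpa [h] using pv_main kv.2 p
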